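-- pv_equiv track=rewrite | github.com/kkyu-min/Programmers | level_0/숫자 찾기.py | solution
-- ===== SOURCE A (Python) =====
-- def solution(num, k):
--     answer = -1
--     tmp = len(str(num)) + 1
--     while num > 0:
--         tmp -= 1
--         if num % 10 == k:
--             answer = tmp
--         num = num // 10
--     return answer
-- ===== SOURCE B (Python) =====
-- def solution(num, k):
--     # Scan the decimal string left-to-right, returning on the first match.
--     if num <= 0:
--         return -1
--     for i, ch in enumerate(str(num)):
--         if ord(ch) - ord('0') == k:
--             return i + 1
--     return -1
-- ===== Notes on version B (the rewrite author's own statement) =====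
-- stated objective: idiomatic
-- what changed: A peels digits right-to-left arithmetically (num % 10, num //= 10), keeping the last match with a countdown position counter; B scans the decimal string left-to-right with enumerate and returns on the first match.
import Mathlib
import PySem

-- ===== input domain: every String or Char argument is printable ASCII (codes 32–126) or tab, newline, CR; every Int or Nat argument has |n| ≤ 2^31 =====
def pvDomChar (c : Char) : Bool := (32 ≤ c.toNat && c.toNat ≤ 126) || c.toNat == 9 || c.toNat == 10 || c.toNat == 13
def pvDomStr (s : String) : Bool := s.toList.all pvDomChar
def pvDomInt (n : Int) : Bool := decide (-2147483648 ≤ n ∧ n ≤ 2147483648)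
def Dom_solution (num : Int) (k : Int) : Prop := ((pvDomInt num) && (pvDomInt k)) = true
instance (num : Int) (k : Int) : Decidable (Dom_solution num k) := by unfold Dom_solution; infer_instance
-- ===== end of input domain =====

-- B scans the decimal string left-to-right returning on the first match, instead of
-- A's right-to-left arithmetic digit peeling keeping the last match; same results, idiomatic rewrite.

-- ===== PORT A =====
-- termination measure helper for the while loop (cited by decreasing_by)
theorem pv_floordiv_toNat_lt (num : Int) (h : 0 < num) :
    (PySem.Int.floordiv num 10).toNat < num.toNat := by
  have h1 : PySem.Int.floordiv num 10 = num / 10 := by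
    simp [PySem.Int.floordiv]
    exact Int.fdiv_eq_ediv_of_nonneg _ (by norm_num)
  have h2 : num / 10 < num := by omega
  have h3 : 0 ≤ num / 10 := by positivity
  omega

-- the `while num > 0:` loop of A, state (num, tmp, answer)
def solutionLoop (num k tmp answer : Int) : Int :=
  if _h : 0 < num then
    let tmp' := tmp - 1
    let answer' := if PySem.Int.mod num 10 = k then tmp' else answer
    solutionLoop (PySem.Int.floordiv num 10) k tmp' answer'
  else answer
termination_by num.toNat
decreasing_by exact pv_floordiv_toNat_lt num _h

def solution (num : Int) (k : Int) : Int :=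
  let answer : Int := -1
  let tmp : Int := PySem.Str.len (PySem.Int.toStr num) + 1
  solutionLoop num k tmp answer

-- ===== PORT B =====
-- the `for i, ch in enumerate(str(num)): if ord(ch) - ord('0') == k: return i + 1` loop
def solutionAltScan (k : Int) : List (Int × Char) → Int
  | [] => -1
  | (i, ch) :: rest =>
      if (ch.toNat : Int) - 48 = k then i + 1 else solutionAltScan k rest

def solution_alt (num : Int) (k : Int) : Int :=
  if num ≤ 0 then -1
  else solutionAltScan k (PySem.List.enumerate (PySem.Int.toStr num).toList 0)

-- ===== PRECONDITION & SPEC =====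
def Spec_solution (num : Int) (k : Int) (out : Int) : Prop := out = solution_alt num k
instance (num : Int) (k : Int) (out : Int) : Decidable (Spec_solution num k out) := by unfold Spec_solution; infer_instance

-- ===== CLAIM (what is proved, stated in full; the proofs are below) =====
def Claim_equal_solution : Prop := ∀ (num : Int) (k : Int), Dom_solution num k → Spec_solution num k (solution num k)

-- ===== LEMMAS AND PROOFS =====

-- little-endian digit view of A's loop
def specA (k : Int) : List Nat → Int → Int → Int
  | [], _, ans => ans
  | d :: ds, tmp, ans => specA k ds (tmp - 1) (if (d : Int) = k then tmp - 1 else ans)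

-- big-endian digit view of B's scan
def specB (k : Int) : List Nat → Int → Int
  | [], _ => -1
  | d :: ds, i => if (d : Int) = k then i + 1 else specB k ds (i + 1)

theorem toDigitsCore_eq_digits (f : Nat) : ∀ (n : Nat) (l : List Char), n < f → 0 < n →
    Nat.toDigitsCore 10 f n l = ((Nat.digits 10 n).map Nat.digitChar).reverse ++ l := by
  induction f with
  | zero => intro n l h; omega
  | succ f ih =>
    intro n l hf hn
    rw [Nat.toDigitsCore]
    rw [Nat.digits_def' (by norm_num : 1 < 10) hn]
    by_cases h : n / 10 = 0
    · simp [h]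
    · rw [if_neg h, ih (n / 10) _ (by omega) (by omega)]
      simp

theorem toChars_pos (num : Int) (h : 0 < num) :
    (PySem.Int.toStr num).toList
      = ((Nat.digits 10 num.toNat).map Nat.digitChar).reverse := by
  rw [PySem.Int.toList_toStr]
  unfold PySem.Int.toChars
  rw [if_neg (by omega)]
  unfold Nat.toDigits
  rw [toDigitsCore_eq_digits (num.toNat + 1) num.toNat [] (by omega) (by omega)]
  simp

theorem solutionLoop_eq_specA (m : Nat) : ∀ (num : Int), num.toNat = m → 0 < num →
    ∀ (k tmp ans : Int),
    solutionLoop num k tmp ans = specA k (Nat.digits 10 num.toNat) tmp ans := by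
  induction m using Nat.strong_induction_on with
  | _ m ih =>
    intro num hm hpos k tmp ans
    obtain ⟨n, rfl⟩ : ∃ n : Nat, num = (n : Int) := ⟨num.toNat, by omega⟩
    have hn : 0 < n := by exact_mod_cast hpos
    have hmod : PySem.Int.mod (n : Int) 10 = ((n % 10 : Nat) : Int) := by
      simp only [PySem.Int.mod]
      rw [Int.fmod_eq_emod]
      simp
    have hdiv : PySem.Int.floordiv (n : Int) 10 = ((n / 10 : Nat) : Int) := by
      simp only [PySem.Int.floordiv]
      rw [Int.fdiv_eq_ediv_of_nonneg _ (by norm_num)]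
      omega
    rw [solutionLoop, dif_pos hpos, hmod, hdiv, Int.toNat_natCast,
      Nat.digits_def' (by norm_num : 1 < 10) hn, specA]
    by_cases h : n / 10 = 0
    · rw [h]
      rw [solutionLoop, dif_neg (by simp)]
      simp [specA]
    · rw [ih (n / 10) (by omega ∘ (hm ▸ Int.toNat_natCast n).symm.trans <| rfl) _
        (Int.toNat_natCast _) (by exact_mod_cast Nat.pos_of_ne_zero h)]
      rw [Int.toNat_natCast]

theorem specA_append_singleton (k : Int) (d : Nat) :
    ∀ (ds : List Nat) (tmp ans : Int),
    specA k (ds ++ [d]) tmp ans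
      = if (d : Int) = k then tmp - ds.length - 1 else specA k ds tmp ans := by
  intro ds
  induction ds with
  | nil => intro tmp ans; simp [specA]
  | cons a t ihd =>
    intro tmp ans
    rw [List.cons_append, specA, specA, ihd]
    simp only [List.length_cons]
    split_ifs <;> first | rfl | (push_cast; ring)

theorem specA_rev_eq_specB (k : Int) :
    ∀ (l : List Nat) (t : Int),
    specA k l.reverse t (-1) = specB k l (t - l.length - 1) := by
  intro l
  induction l with
  | nil => intro t; simp [specA, specB]
  | cons d tl ihl =>
    intro t
    rw [List.reverse_cons, specA_append_singleton, specB, ihl]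
    simp only [List.length_reverse, List.length_cons]
    split_ifs
    · push_cast; ring
    · congr 1; push_cast; ring

theorem digitChar_sub_48 (d : Nat) (h : d < 10) :
    ((Nat.digitChar d).toNat : Int) - 48 = (d : Int) := by
  interval_cases d <;> decide

theorem scan_enum_eq_specB (k : Int) :
    ∀ (l : List Nat), (∀ d ∈ l, d < 10) → ∀ (s : Int),
    solutionAltScan k (PySem.List.enumerate (l.map Nat.digitChar) s) = specB k l s := by
  intro l
  induction l with
  | nil => intro _ s; simp [solutionAltScan, specB, PySem.List.enumerate_nil]
  | cons d tl ihl =>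
    intro hd s
    rw [List.map_cons, PySem.List.enumerate_cons, solutionAltScan, specB,
      digitChar_sub_48 d (hd d (by simp)), ihl (fun x hx => hd x (by simp [hx]))]

theorem str_len_toStr_pos (num : Int) (h : 0 < num) :
    PySem.Str.len (PySem.Int.toStr num) = ((Nat.digits 10 num.toNat).length : Int) := by
  have : PySem.Str.len (PySem.Int.toStr num) = ((PySem.Int.toStr num).toList.length : Int) := by
    simp [PySem.Str.len]
  rw [this, toChars_pos num h]
  simp

-- ===== VERDICT (by name: the statement is the Claim_ definition above) =====
theorem solution_spec : Claim_equal_solution := by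
  intro num k _
  unfold Spec_solution solution solution_alt
  by_cases h : num ≤ 0
  · rw [if_pos h, solutionLoop, dif_neg (by omega)]
  · have hpos : 0 < num := by omega
    rw [if_neg h]
    rw [solutionLoop_eq_specA num.toNat num rfl hpos]
    rw [str_len_toStr_pos num hpos, toChars_pos num hpos]
    rw [← List.map_reverse]
    rw [scan_enum_eq_specB k _ (fun d hd => Nat.digits_lt_base (by norm_num) (by simpa using hd)) 0]
    have := specA_rev_eq_specB k (Nat.digits 10 num.toNat).reverse
      (((Nat.digits 10 num.toNat).length : Int) + 1)
    simp only [List.reverse_reverse, List.length_reverse] at this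
    rw [this]
    ring_nf
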